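-- pv_equiv track=rewrite | github.com/sanjmeh/python_in_R | ID_event.py | From_Togrouping
-- ===== SOURCE A (Python) =====
-- def From_Togrouping(indicator,from_,to_):
--     buckets = []
--     start_position = None
--     for i, value in enumerate(indicator):
--         if value == from_:
--             if start_position is not None:
--                 end_position = i
--                 buckets.append((start_position, end_position))
--             start_position = i
--         elif value == to_:
--             if start_position is not None:
--                 end_position = i
--                 buckets.append((start_position, end_position))
--                 start_position = None
--     if start_position is not None:
--         buckets.append((start_position, len(indicator)))
--     return buckets
-- ===== SOURCE B (Python) =====
-- def From_Togrouping(indicator, from_, to_):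
--     # Different decomposition: collect every from_ position as a bucket start and
--     # close it at the next from_/to_ marker (or at len(indicator) if none follows).
--     n = len(indicator)
--
--     def next_stop(j):
--         while j < n:
--             if indicator[j] == from_ or indicator[j] == to_:
--                 return j
--             j += 1
--         return n
--
--     return [(i, next_stop(i + 1)) for i, v in enumerate(indicator) if v == from_]
-- ===== Notes on version B (the rewrite author's own statement) =====
-- stated objective: alternative
-- what changed: Replaces A's single-pass flip-flop state machine (optional open-start carried through the loop, closed on either marker, trailing close at the end) by a stateless formulation: each from_ position starts a bucket that ends at the next from_/to_ marker, or at len(indicator).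
import Mathlib
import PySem

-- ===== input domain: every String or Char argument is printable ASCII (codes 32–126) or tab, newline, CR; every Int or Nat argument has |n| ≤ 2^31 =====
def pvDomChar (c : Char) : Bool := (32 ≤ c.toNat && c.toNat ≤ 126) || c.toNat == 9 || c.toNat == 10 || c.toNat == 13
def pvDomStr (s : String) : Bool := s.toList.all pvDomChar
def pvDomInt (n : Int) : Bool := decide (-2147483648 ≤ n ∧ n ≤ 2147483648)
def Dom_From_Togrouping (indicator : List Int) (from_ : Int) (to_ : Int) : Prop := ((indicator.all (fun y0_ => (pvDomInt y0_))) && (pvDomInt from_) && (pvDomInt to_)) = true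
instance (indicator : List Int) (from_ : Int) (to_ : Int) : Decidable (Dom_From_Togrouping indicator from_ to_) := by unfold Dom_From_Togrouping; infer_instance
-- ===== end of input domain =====

-- B replaces A's stateful single-pass flip-flop by a stateless "each from_ starts a
-- bucket closed at the next from_/to_ marker (or the end)" decomposition (objective: alternative).

-- ===== PORT A =====
-- one loop step of A: state = (buckets, start_position), item = (i, value)
def pvStepA (from_ to_ : Int) (st : List (Int × Int) × Option Int) (iv : Int × Int) :
    List (Int × Int) × Option Int :=
  if iv.2 = from_ then
    match st.2 with
    | some p => (st.1 ++ [(p, iv.1)], some iv.1)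
    | none => (st.1, some iv.1)
  else if iv.2 = to_ then
    match st.2 with
    | some p => (st.1 ++ [(p, iv.1)], none)
    | none => st
  else st

def From_Togrouping (indicator : List Int) (from_ : Int) (to_ : Int) : List (Int × Int) :=
  let st := (PySem.List.enumerate indicator).foldl (pvStepA from_ to_) ([], none)
  match st.2 with
  | some p => st.1 ++ [(p, (indicator.length : Int))]
  | none => st.1

-- ===== PORT B =====
-- next_stop: offset (within the suffix after a start) of the next from_/to_ marker,
-- or the suffix length if none — B's forward scan.
def pvNextStop (from_ to_ : Int) : List Int → Nat
  | [] => 0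
  | v :: rest => if v = from_ ∨ v = to_ then 0 else pvNextStop from_ to_ rest + 1

-- the comprehension over enumerate(indicator): emit (i, next_stop(i+1)) at each from_
def pvAltGo (from_ to_ : Int) : List Int → Int → List (Int × Int)
  | [], _ => []
  | v :: rest, i =>
    if v = from_ then (i, i + 1 + (pvNextStop from_ to_ rest : Int)) :: pvAltGo from_ to_ rest (i + 1)
    else pvAltGo from_ to_ rest (i + 1)

def From_Togrouping_alt (indicator : List Int) (from_ : Int) (to_ : Int) : List (Int × Int) :=
  pvAltGo from_ to_ indicator 0

-- ===== PRECONDITION & SPEC =====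
def Spec_From_Togrouping (indicator : List Int) (from_ : Int) (to_ : Int) (out : List (Int × Int)) : Prop := out = From_Togrouping_alt indicator from_ to_
instance (indicator : List Int) (from_ : Int) (to_ : Int) (out : List (Int × Int)) : Decidable (Spec_From_Togrouping indicator from_ to_ out) := by unfold Spec_From_Togrouping; infer_instance

-- ===== CLAIM (what is proved, stated in full; the proofs are below) =====
def Claim_equal_From_Togrouping : Prop := ∀ (indicator : List Int) (from_ : Int) (to_ : Int), Dom_From_Togrouping indicator from_ to_ → Spec_From_Togrouping indicator from_ to_ (From_Togrouping indicator from_ to_)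

-- ===== LEMMAS AND PROOFS =====
-- close-out step of A (append the trailing bucket if a start is still open)
def pvClose (n : Int) (st : List (Int × Int) × Option Int) : List (Int × Int) :=
  match st.2 with
  | some p => st.1 ++ [(p, n)]
  | none => st.1

-- Invariant of A's fold: starting from (acc, s) at index i with suffix l, the
-- closed-out bucket list is acc followed by: if a start p is open, the bucket
-- (p, i + next marker offset in l), then B's output for the suffix.
theorem pvKey (from_ to_ : Int) (l : List Int) : ∀ (i : Int) (acc : List (Int × Int)) (s : Option Int),
    pvClose (i + (l.length : Int)) ((PySem.List.enumerate l i).foldl (pvStepA from_ to_) (acc, s))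
    = acc ++ (match s with
      | some p => (p, i + (pvNextStop from_ to_ l : Int)) :: pvAltGo from_ to_ l i
      | none => pvAltGo from_ to_ l i) := by
  induction l with
  | nil =>
    intro i acc s
    cases s <;> simp [PySem.List.enumerate, pvNextStop, pvAltGo, pvClose]
  | cons v rest ih =>
    intro i acc s
    rw [PySem.List.enumerate_cons, List.foldl_cons]
    have hn : i + ((v :: rest).length : Int) = (i + 1) + (rest.length : Int) := by
      simp only [List.length_cons]; push_cast; ring
    rw [hn]
    by_cases hf : v = from_
    · cases s with
      | none =>
        have hst : pvStepA from_ to_ (acc, none) (i, v) = (acc, some i) := by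
          simp [pvStepA, hf]
        rw [hst, ih]
        simp [pvAltGo, hf]
      | some p =>
        have hst : pvStepA from_ to_ (acc, some p) (i, v) = (acc ++ [(p, i)], some i) := by
          simp [pvStepA, hf]
        rw [hst, ih]
        simp [pvAltGo, pvNextStop, hf]
    · by_cases ht : v = to_
      · have htf : ¬ to_ = from_ := fun h => hf (ht.trans h)
        cases s with
        | none =>
          have hst : pvStepA from_ to_ (acc, none) (i, v) = (acc, none) := by
            simp [pvStepA, ht, htf]
          rw [hst, ih]
          simp [pvAltGo, ht]
          exact htf
        | some p =>
          have hst : pvStepA from_ to_ (acc, some p) (i, v) = (acc ++ [(p, i)], none) := by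
            simp [pvStepA, ht, htf]
          rw [hst, ih]
          simp [pvAltGo, pvNextStop, ht]
          exact htf
      · cases s with
        | none =>
          have hst : pvStepA from_ to_ (acc, none) (i, v) = (acc, none) := by
            simp [pvStepA, hf, ht]
          rw [hst, ih]
          simp [pvAltGo, hf]
        | some p =>
          have hst : pvStepA from_ to_ (acc, some p) (i, v) = (acc, some p) := by
            simp [pvStepA, hf, ht]
          rw [hst, ih]
          simp [pvAltGo, pvNextStop, hf, ht]
          ring

-- ===== VERDICT (by name: the statement is the Claim_ definition above) =====
theorem From_Togrouping_spec : Claim_equal_From_Togrouping := by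
  intro indicator from_ to_ _
  unfold Spec_From_Togrouping From_Togrouping From_Togrouping_alt
  have h := pvKey from_ to_ indicator 0 [] none
  simp only [zero_add] at h
  exact h
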